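-- pv_equiv track=rewrite | github.com/HAAIL-Universe/Little_Chef | app/services/inventory_agent.py | _previous_sentence_boundary
-- ===== SOURCE A (Python) =====
-- SENTENCE_TERMINATORS = (".", "!", "?")
--
-- def _previous_sentence_boundary(lower_text: str, index: int) -> int:
--     boundary = 0
--     for sep in SENTENCE_TERMINATORS:
--         pos = lower_text.rfind(sep, 0, index)
--         if pos != -1:
--             candidate = pos + 1
--             if candidate > boundary:
--                 boundary = candidate
--     return boundary
-- ===== SOURCE B (Python) =====
-- SENTENCE_TERMINATORS = (".", "!", "?")
--
-- def _previous_sentence_boundary(lower_text: str, index: int) -> int: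
--     n = len(lower_text)
--     e = index if index >= 0 else n + index
--     if e < 0:
--         e = 0
--     elif e > n:
--         e = n
--     for i in range(e - 1, -1, -1):
--         if lower_text[i] in SENTENCE_TERMINATORS:
--             return i + 1
--     return 0
-- ===== Notes on version B (the rewrite author's own statement) =====
-- stated objective: alternative
-- what changed: Replaces the three library rfind scans plus a running max by one explicit backward character scan from the clamped end bound, returning at the first terminator found.
import Mathlib
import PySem

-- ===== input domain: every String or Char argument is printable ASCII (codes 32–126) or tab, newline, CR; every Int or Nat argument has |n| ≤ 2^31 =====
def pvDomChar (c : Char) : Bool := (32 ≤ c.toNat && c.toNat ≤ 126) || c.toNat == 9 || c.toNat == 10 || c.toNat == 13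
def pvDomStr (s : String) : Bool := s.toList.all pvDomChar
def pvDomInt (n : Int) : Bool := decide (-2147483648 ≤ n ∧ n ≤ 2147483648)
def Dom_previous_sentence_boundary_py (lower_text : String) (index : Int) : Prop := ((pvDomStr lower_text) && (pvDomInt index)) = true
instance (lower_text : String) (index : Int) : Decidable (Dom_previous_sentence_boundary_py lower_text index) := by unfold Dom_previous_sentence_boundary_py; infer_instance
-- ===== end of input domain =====

-- B replaces A's three rfind scans plus a running max by one backward character scan
-- from the clamped end bound (alternative decomposition, same asymptotic cost).

-- ===== PORT A =====
-- for sep in (".", "!", "?"): pos = lower_text.rfind(sep, 0, index); …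
def previous_sentence_boundary_py (lower_text : String) (index : Int) : Int :=
  [".", "!", "?"].foldl (fun boundary sep =>
    let pos := PySem.Str.rfindFrom lower_text sep 0 (some index)
    if pos ≠ -1 then
      let candidate := pos + 1
      if candidate > boundary then candidate else boundary
    else boundary) 0

-- ===== PORT B =====
-- the backward for-loop of Source B: scanning i = e-1, e-2, …, 0 is folding over the
-- reversed prefix of length e; an element with `rest` after it sits at index rest.length
def pvAltScan : List Char → Int
  | [] => 0
  | ch :: rest => if ch = '.' ∨ ch = '!' ∨ ch = '?' then (rest.length : Int) + 1 else pvAltScan rest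

def previous_sentence_boundary_py_alt (lower_text : String) (index : Int) : Int :=
  let L := lower_text.toList
  let n : Int := L.length
  let e0 : Int := if 0 ≤ index then index else n + index
  let e1 : Int := if e0 < 0 then 0 else e0
  let e : Int := if e1 > n then n else e1
  pvAltScan (L.take e.toNat).reverse

-- ===== PRECONDITION & SPEC =====
def Spec_previous_sentence_boundary_py (lower_text : String) (index : Int) (out : Int) : Prop := out = previous_sentence_boundary_py_alt lower_text index
instance (lower_text : String) (index : Int) (out : Int) : Decidable (Spec_previous_sentence_boundary_py lower_text index out) := by unfold Spec_previous_sentence_boundary_py; infer_instance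

-- ===== CLAIM (what is proved, stated in full; the proofs are below) =====
def Claim_equal_previous_sentence_boundary_py : Prop := ∀ (lower_text : String) (index : Int), Dom_previous_sentence_boundary_py lower_text index → Spec_previous_sentence_boundary_py lower_text index (previous_sentence_boundary_py lower_text index)

-- ===== LEMMAS AND PROOFS =====

-- A's boundary loop, expressed over the character prefix P = L.take e
def pvACore (P : List Char) : Int :=
  ['.', '!', '?'].foldl (fun boundary c =>
    let pos := PySem.Chars.rfind P [c]
    if pos ≠ -1 then
      let candidate := pos + 1
      if candidate > boundary then candidate else boundary
    else boundary) 0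

theorem pv_go_le (s sub : List Char) (k : Nat) : PySem.Chars.rfind.go s sub k ≤ (k : Int) := by
  induction k with
  | zero => simp [PySem.Chars.rfind.go]; split <;> simp
  | succ j ih =>
    rw [PySem.Chars.rfind.go]
    split
    · simp
    · exact le_trans ih (by push_cast; omega)

theorem pv_rfind_lt (P : List Char) (c : Char) :
    PySem.Chars.rfind P [c] < (P.length : Int) := by
  unfold PySem.Chars.rfind
  cases h : P.length with
  | zero =>
    have hP : P = [] := List.eq_nil_of_length_eq_zero h
    subst hP; simp [PySem.Chars.rfind.go, List.isPrefixOf]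
  | succ m =>
    rw [PySem.Chars.rfind.go]
    have hdrop : List.drop (m + 1) P = [] := by
      apply List.drop_eq_nil_of_le; omega
    rw [hdrop]
    simp [List.isPrefixOf]
    have := pv_go_le P [c] m
    omega

theorem pv_prefix_append (l : List Char) (c c' : Char) (hl : l ≠ []) :
    [c'].isPrefixOf (l ++ [c]) = [c'].isPrefixOf l := by
  cases l with
  | nil => exact absurd rfl hl
  | cons a t => simp [List.isPrefixOf]

theorem pv_go_append (P : List Char) (c c' : Char) (k : Nat) (hk : k < P.length) :
    PySem.Chars.rfind.go (P ++ [c]) [c'] k = PySem.Chars.rfind.go P [c'] k := by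
  induction k with
  | zero =>
    rw [PySem.Chars.rfind.go, PySem.Chars.rfind.go]
    rw [show (P ++ [c] : List Char) = P ++ [c] from rfl]
    rw [pv_prefix_append P c c' (by intro h; simp [h] at hk)]
  | succ j ih =>
    rw [PySem.Chars.rfind.go, PySem.Chars.rfind.go]
    have hne : List.drop (j + 1) P ≠ [] := by
      intro h
      have := List.drop_eq_nil_iff.mp h
      omega
    rw [List.drop_append_of_le_length (by omega), pv_prefix_append _ c c' hne]
    split
    · rfl
    · exact ih (by omega)

theorem pv_rfind_append (P : List Char) (c c' : Char) :
    PySem.Chars.rfind (P ++ [c]) [c'] =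
      if c' = c then (P.length : Int) else PySem.Chars.rfind P [c'] := by
  unfold PySem.Chars.rfind
  have hlen : (P ++ [c]).length = P.length + 1 := by simp
  rw [hlen]
  rw [PySem.Chars.rfind.go]
  have hdrop0 : List.drop (P.length + 1) (P ++ [c]) = [] := by
    apply List.drop_eq_nil_of_le; simp
  rw [hdrop0]
  simp only [List.isPrefixOf, Bool.false_eq_true, if_false]
  cases h : P.length with
  | zero =>
    have hP : P = [] := List.eq_nil_of_length_eq_zero h
    subst hP
    rw [PySem.Chars.rfind.go]
    simp [List.isPrefixOf, PySem.Chars.rfind.go]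
  | succ m =>
    rw [PySem.Chars.rfind.go]
    have hdrop1 : List.drop (m + 1) (P ++ [c]) = [c] := by
      rw [List.drop_append_of_le_length (by omega)]
      have : List.drop (m + 1) P = [] := by apply List.drop_eq_nil_of_le; omega
      rw [this]; rfl
    rw [hdrop1]
    have hpre : ([c'].isPrefixOf [c]) = (c' == c) := by simp [List.isPrefixOf]
    rw [hpre]
    by_cases hc : c' = c
    · simp [hc]
    · rw [if_neg (by simpa using hc), if_neg hc]
      rw [pv_go_append P c c' m (by omega)]
      conv_rhs => rw [PySem.Chars.rfind.go]
      have hdrop2 : List.drop (m + 1) P = [] := by apply List.drop_eq_nil_of_le; omega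
      rw [hdrop2]
      simp [List.isPrefixOf]

set_option maxHeartbeats 1000000 in
theorem pv_core_eq (P : List Char) : pvACore P = pvAltScan P.reverse := by
  induction P using List.reverseRecOn with
  | nil => decide
  | append_singleton P c ih =>
    have hd := pv_rfind_lt P '.'
    have hb := pv_rfind_lt P '!'
    have hq := pv_rfind_lt P '?'
    simp only [pvACore, List.foldl_cons, List.foldl_nil, pv_rfind_append,
      List.reverse_append, List.reverse_singleton, List.singleton_append, pvAltScan,
      List.length_reverse]
    by_cases hc : c = '.' ∨ c = '!' ∨ c = '?'
    · rw [if_pos hc]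
      rcases hc with h | h | h <;> subst h <;>
        simp only [reduceIte] <;> split_ifs <;> omega
    · rw [if_neg hc]
      push Not at hc
      have e1 : (if '.' = c then (P.length : Int) else PySem.Chars.rfind P ['.']) =
          PySem.Chars.rfind P ['.'] := if_neg (fun h => hc.1 h.symm)
      have e2 : (if '!' = c then (P.length : Int) else PySem.Chars.rfind P ['!']) =
          PySem.Chars.rfind P ['!'] := if_neg (fun h => hc.2.1 h.symm)
      have e3 : (if '?' = c then (P.length : Int) else PySem.Chars.rfind P ['?']) =
          PySem.Chars.rfind P ['?'] := if_neg (fun h => hc.2.2 h.symm)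
      rw [e1, e2, e3, ← ih]
      simp only [pvACore, List.foldl_cons, List.foldl_nil]

theorem pv_rfindFrom_eq (L : List Char) (sub : List Char) (idx : Int) :
    PySem.Chars.rfindFrom L sub 0 (some idx) =
      PySem.Chars.rfind (L.take (if (L.length : Int) < idx then (L.length : Int)
        else if idx < 0 then (if idx + (L.length : Int) < 0 then 0 else idx + (L.length : Int))
        else idx).toNat) sub := by
  have hn : (0 : Int) ≤ (L.length : Int) := Int.natCast_nonneg _
  unfold PySem.Chars.rfindFrom
  split_ifs <;> simp only [Int.toNat_zero, List.drop_zero, zero_add] at * <;>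
    first | omega | (split_ifs <;> (try simp only [Int.toNat_zero] at *) <;> omega)

theorem pv_clamp_toNat (idx n : Int) (hn : 0 ≤ n) :
    (if n < idx then n
      else if idx < 0 then (if idx + n < 0 then 0 else idx + n)
      else idx).toNat
    = (if (if (if 0 ≤ idx then idx else n + idx) < 0 then 0
          else (if 0 ≤ idx then idx else n + idx)) > n then n
        else (if (if 0 ≤ idx then idx else n + idx) < 0 then 0
          else (if 0 ≤ idx then idx else n + idx))).toNat := by
  split_ifs <;> omega

theorem previous_sentence_boundary_py_spec : Claim_equal_previous_sentence_boundary_py := by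
  unfold Claim_equal_previous_sentence_boundary_py
  intro s i _
  unfold Spec_previous_sentence_boundary_py
  unfold previous_sentence_boundary_py previous_sentence_boundary_py_alt
  simp only [List.foldl_cons, List.foldl_nil, PySem.Str.rfindFrom_eq]
  rw [show (".".toList) = ['.'] from rfl, show ("!".toList) = ['!'] from rfl,
    show ("?".toList) = ['?'] from rfl]
  rw [pv_rfindFrom_eq, pv_rfindFrom_eq, pv_rfindFrom_eq]
  rw [← pv_core_eq]
  simp only [pvACore, List.foldl_cons, List.foldl_nil]
  rw [pv_clamp_toNat i (s.toList.length : Int) (Int.natCast_nonneg _)]
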